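-- pv_equiv track=rewrite | github.com/huikinglam02gmail/Leetcode_solutions | 2575.find-the-divisibility-array-of-a-string.py | divisibilityArray
-- ===== SOURCE A (Python) =====
-- from typing import List
--
-- def divisibilityArray(word: str, m: int) -> List[int]:
--     b = 0
--     result = []
--     for c in word:
--         b = 10 * b + int(c)
--         b %= m
--         if b == 0: result.append(1)
--         else: result.append(0)
--     return result
-- ===== SOURCE B (Python) =====
-- from typing import List
--
-- def divisibilityArray(word: str, m: int) -> List[int]:
--     digs = [int(c) for c in word]
--     n = len(digs)
--     pw = [pow(10, k, m) for k in range(n)]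
--     return [1 if sum(digs[j] * pw[i - j] for j in range(i + 1)) % m == 0 else 0
--             for i in range(n)]
-- ===== Notes on version B (the rewrite author's own statement) =====
-- stated objective: alternative
-- what changed: B drops A's single-pass running remainder (Horner) and instead recomputes each prefix residue independently as a positional weighted sum of the digits against a precomputed table of powers of ten mod m; Pre_ excludes m = 0 (Python raises ZeroDivisionError on every nonempty word; only the degenerate empty word returns) and words with non-digit characters (ValueError).
-- outside the precondition, e.g. on divisibilityArray('', 0): A returns [], B returns []
import Mathlib
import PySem

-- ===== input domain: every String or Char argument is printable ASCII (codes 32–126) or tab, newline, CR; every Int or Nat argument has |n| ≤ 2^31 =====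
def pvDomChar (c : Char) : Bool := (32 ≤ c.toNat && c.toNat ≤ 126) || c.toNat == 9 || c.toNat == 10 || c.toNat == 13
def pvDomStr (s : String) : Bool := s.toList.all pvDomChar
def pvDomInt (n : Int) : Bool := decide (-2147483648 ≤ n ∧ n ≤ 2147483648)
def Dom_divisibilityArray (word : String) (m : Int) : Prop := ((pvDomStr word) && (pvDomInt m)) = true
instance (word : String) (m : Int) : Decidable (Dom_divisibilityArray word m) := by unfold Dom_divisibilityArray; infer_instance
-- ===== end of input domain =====

-- B replaces A's single-pass running remainder (Horner) by an independent per-index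
-- weighted-sum computation against a precomputed table of powers of ten mod m
-- ("alternative": structurally different, not faster).

-- ===== PORT A =====
-- int(c) is ported as PySem.Int.ofStr? with default 0; under Pre_ every character is a
-- digit so the option is always some.
def divisibilityArray (word : String) (m : Int) : List Int :=
  (word.toList.foldl
    (fun (st : Int × List Int) c =>
      let b := PySem.Int.mod (10 * st.1 + (PySem.Int.ofStr? (String.ofList [c])).getD 0) m
      if b == 0 then (b, st.2 ++ [1]) else (b, st.2 ++ [0]))
    ((0 : Int), ([] : List Int))).2

-- ===== PORT B =====
-- pow(10, k, m) is ported as PySem.Int.mod (10 ^ k) m — exact for k ≥ 0 and m ≠ 0 (Pre_).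
def divisibilityArray_alt (word : String) (m : Int) : List Int :=
  let digs : List Int := word.toList.map (fun c => (PySem.Int.ofStr? (String.ofList [c])).getD 0)
  let n : Int := PySem.List.len digs
  let pw : List Int := (PySem.List.pyRange 0 n 1).map (fun k => PySem.Int.mod (10 ^ k.toNat) m)
  (PySem.List.pyRange 0 n 1).map (fun i =>
    if PySem.Int.mod
        (((PySem.List.pyRange 0 (i + 1) 1).map
          (fun j => PySem.List.pyGetD digs j 0 * PySem.List.pyGetD pw (i - j) 0)).sum) m == 0
    then (1 : Int) else 0)

-- ===== PRECONDITION & SPEC =====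
-- Pre_ excludes m = 0, where Python raises ZeroDivisionError on every nonempty word
-- (only the degenerate empty word still returns []), and words with a non-digit
-- character, where Python raises ValueError.
def Pre_divisibilityArray (word : String) (m : Int) : Prop :=
  m ≠ 0 ∧ word.toList.all PySem.Chars.isdigit = true
instance (word : String) (m : Int) : Decidable (Pre_divisibilityArray word m) := by
  unfold Pre_divisibilityArray; infer_instance
def pvWitness_divisibilityArray : String × Int := ("15", 3)

def Spec_divisibilityArray (word : String) (m : Int) (out : List Int) : Prop :=
  out = divisibilityArray_alt word m
instance (word : String) (m : Int) (out : List Int) : Decidable (Spec_divisibilityArray word m out) := by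
  unfold Spec_divisibilityArray; infer_instance

-- ===== CLAIM (what is proved, stated in full; the proofs are below) =====
def Claim_equal_divisibilityArray : Prop :=
  ∀ (word : String) (m : Int), Dom_divisibilityArray word m → Pre_divisibilityArray word m →
    Spec_divisibilityArray word m (divisibilityArray word m)

-- ===== LEMMAS AND PROOFS =====

-- digit value of a character
def pvDval (c : Char) : Int := (c.toNat : Int) - 48

-- value of a digit list read as a decimal number (Horner)
def pvVal (l : List Int) : Int := l.foldl (fun a d => 10 * a + d) 0

-- the common specification both ports are reduced to
def pvSpecList (m : Int) (ds : List Int) : List Int :=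
  (List.range ds.length).map (fun i => if m ∣ pvVal (ds.take (i + 1)) then 1 else 0)

theorem charOfToNat (c d : Char) (h : c.val.toNat = d.val.toNat) : c = d :=
  Char.ext (UInt32.toNat_inj.mp h)

theorem digit_char_cases (c : Char) (h : PySem.Chars.isdigit c = true) :
    c = '0' ∨ c = '1' ∨ c = '2' ∨ c = '3' ∨ c = '4' ∨ c = '5' ∨ c = '6' ∨ c = '7' ∨ c = '8' ∨ c = '9' := by
  simp [PySem.Chars.isdigit, Char.le_def] at h
  obtain ⟨h1, h2⟩ := h
  have hn1 : 48 ≤ c.val.toNat := by exact_mod_cast UInt32.le_iff_toNat_le.mp h1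
  have hn2 : c.val.toNat ≤ 57 := by exact_mod_cast UInt32.le_iff_toNat_le.mp h2
  have hd : c.val.toNat = 48 ∨ c.val.toNat = 49 ∨ c.val.toNat = 50 ∨ c.val.toNat = 51 ∨
      c.val.toNat = 52 ∨ c.val.toNat = 53 ∨ c.val.toNat = 54 ∨ c.val.toNat = 55 ∨
      c.val.toNat = 56 ∨ c.val.toNat = 57 := by omega
  rcases hd with h|h|h|h|h|h|h|h|h|h
  · exact Or.inl (charOfToNat c '0' h)
  · exact Or.inr (Or.inl (charOfToNat c '1' h))
  · exact Or.inr (Or.inr (Or.inl (charOfToNat c '2' h)))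
  · exact Or.inr (Or.inr (Or.inr (Or.inl (charOfToNat c '3' h))))
  · exact Or.inr (Or.inr (Or.inr (Or.inr (Or.inl (charOfToNat c '4' h)))))
  · exact Or.inr (Or.inr (Or.inr (Or.inr (Or.inr (Or.inl (charOfToNat c '5' h))))))
  · exact Or.inr (Or.inr (Or.inr (Or.inr (Or.inr (Or.inr (Or.inl (charOfToNat c '6' h)))))))
  · exact Or.inr (Or.inr (Or.inr (Or.inr (Or.inr (Or.inr (Or.inr (Or.inl (charOfToNat c '7' h))))))))
  · exact Or.inr (Or.inr (Or.inr (Or.inr (Or.inr (Or.inr (Or.inr (Or.inr (Or.inl (charOfToNat c '8' h)))))))))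
  · exact Or.inr (Or.inr (Or.inr (Or.inr (Or.inr (Or.inr (Or.inr (Or.inr (Or.inr (charOfToNat c '9' h)))))))))

-- int(c) on a digit character
theorem digit_val (c : Char) (h : PySem.Chars.isdigit c = true) :
    (PySem.Int.ofStr? (String.ofList [c])).getD 0 = pvDval c := by
  rcases digit_char_cases c h with h|h|h|h|h|h|h|h|h|h <;> subst h <;> decide

-- mod keeps the residue class
theorem mod_sub_dvd (a b : Int) : b ∣ (PySem.Int.mod a b - a) := by
  refine ⟨-(PySem.Int.floordiv a b), ?_⟩
  have h := PySem.Int.floordiv_mul_add_mod a b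
  linarith [h]

theorem pvVal_append (l : List Int) (d : Int) : pvVal (l ++ [d]) = 10 * pvVal l + d := by
  simp [pvVal]

theorem pvSpecList_append (m : Int) (ds : List Int) (d : Int) :
    pvSpecList m (ds ++ [d]) = pvSpecList m ds ++ [if m ∣ pvVal (ds ++ [d]) then 1 else 0] := by
  unfold pvSpecList
  simp only [List.length_append, List.length_cons, List.length_nil, Nat.zero_add,
    List.range_succ, List.map_append, List.map_cons, List.map_nil]
  congr 1
  · exact List.map_congr_left (fun i hi => by
      have : i + 1 ≤ ds.length := by
        have := List.mem_range.mp hi; omega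
      rw [List.take_append_of_le_length this])
  · have h2 : ds.length + 1 = (ds ++ [d]).length := by simp
    rw [h2, List.take_length]

theorem sum_map_sub {α : Type} (l : List α) (f g : α → Int) :
    (l.map f).sum - (l.map g).sum = (l.map (fun x => f x - g x)).sum := by
  induction l with
  | nil => simp
  | cons a t ih => simp only [List.map_cons, List.sum_cons]; omega

-- A's fold: invariant on the running remainder plus characterization of the output list
theorem foldA_char (m : Int) (cs : List Char) (h : ∀ c ∈ cs, PySem.Chars.isdigit c = true) :
    m ∣ ((cs.foldl
        (fun (st : Int × List Int) c =>
          let b := PySem.Int.mod (10 * st.1 + (PySem.Int.ofStr? (String.ofList [c])).getD 0) m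
          if b == 0 then (b, st.2 ++ [1]) else (b, st.2 ++ [0]))
        ((0 : Int), ([] : List Int))).1 - pvVal (cs.map pvDval)) ∧
    (cs.foldl
        (fun (st : Int × List Int) c =>
          let b := PySem.Int.mod (10 * st.1 + (PySem.Int.ofStr? (String.ofList [c])).getD 0) m
          if b == 0 then (b, st.2 ++ [1]) else (b, st.2 ++ [0]))
        ((0 : Int), ([] : List Int))).2 = pvSpecList m (cs.map pvDval) := by
  induction cs using List.reverseRecOn with
  | nil => simp [pvVal, pvSpecList]
  | append_singleton cs c ih =>
    have hc : PySem.Chars.isdigit c = true := h c (by simp)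
    have hcs : ∀ c' ∈ cs, PySem.Chars.isdigit c' = true := fun c' hc' => h c' (by simp [hc'])
    obtain ⟨ih1, ih2⟩ := ih hcs
    set F := (fun (st : Int × List Int) c =>
          let b := PySem.Int.mod (10 * st.1 + (PySem.Int.ofStr? (String.ofList [c])).getD 0) m
          if b == 0 then (b, st.2 ++ [1]) else (b, st.2 ++ [0])) with hF
    set st := cs.foldl F ((0 : Int), ([] : List Int)) with hst
    have hfold : (cs ++ [c]).foldl F ((0 : Int), ([] : List Int)) = F st c := by
      rw [List.foldl_append]; rfl
    have hb : 10 * st.1 + (PySem.Int.ofStr? (String.ofList [c])).getD 0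
        = 10 * st.1 + pvDval c := by rw [digit_val c hc]
    have hpv : pvVal ((cs ++ [c]).map pvDval) = 10 * pvVal (cs.map pvDval) + pvDval c := by
      rw [List.map_append]; simpa using pvVal_append (cs.map pvDval) (pvDval c)
    -- residue of the new b
    have hres : m ∣ (PySem.Int.mod (10 * st.1 + pvDval c) m - pvVal ((cs ++ [c]).map pvDval)) := by
      rw [hpv]
      have h1 := mod_sub_dvd (10 * st.1 + pvDval c) m
      have h2 : m ∣ ((10 * st.1 + pvDval c) - (10 * pvVal (cs.map pvDval) + pvDval c)) := by
        have : (10 * st.1 + pvDval c) - (10 * pvVal (cs.map pvDval) + pvDval c)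
            = 10 * (st.1 - pvVal (cs.map pvDval)) := by ring
        rw [this]; exact Dvd.dvd.mul_left ih1 10
      have h3 := dvd_add h1 h2
      rwa [show PySem.Int.mod (10 * st.1 + pvDval c) m - (10 * st.1 + pvDval c) +
          ((10 * st.1 + pvDval c) - (10 * pvVal (cs.map pvDval) + pvDval c))
          = PySem.Int.mod (10 * st.1 + pvDval c) m
            - (10 * pvVal (cs.map pvDval) + pvDval c) from by ring] at h3
    have hFst : F st c = (PySem.Int.mod (10 * st.1 + pvDval c) m,
        st.2 ++ [if PySem.Int.mod (10 * st.1 + pvDval c) m == 0 then (1 : Int) else 0]) := by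
      simp only [hF, hb]
      split <;> simp_all
    -- new output-condition matches the spec condition
    have hcond : (PySem.Int.mod (10 * st.1 + pvDval c) m == 0)
        = decide (m ∣ pvVal ((cs ++ [c]).map pvDval)) := by
      have hiff : PySem.Int.mod (10 * st.1 + pvDval c) m = 0
          ↔ m ∣ pvVal ((cs ++ [c]).map pvDval) := by
        rw [PySem.Int.mod_eq_zero_iff_dvd, hpv]
        constructor
        · intro hx
          have h2 : m ∣ ((10 * pvVal (cs.map pvDval) + pvDval c) - (10 * st.1 + pvDval c)) := by
            have : (10 * pvVal (cs.map pvDval) + pvDval c) - (10 * st.1 + pvDval c)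
                = -(10 * (st.1 - pvVal (cs.map pvDval))) := by ring
            rw [this]; exact dvd_neg.mpr (Dvd.dvd.mul_left ih1 10)
          have h3 := dvd_add hx h2
          rwa [show (10 * st.1 + pvDval c) +
              ((10 * pvVal (cs.map pvDval) + pvDval c) - (10 * st.1 + pvDval c))
              = 10 * pvVal (cs.map pvDval) + pvDval c from by ring] at h3
        · intro hx
          have h2 : m ∣ ((10 * st.1 + pvDval c) - (10 * pvVal (cs.map pvDval) + pvDval c)) := by
            have : (10 * st.1 + pvDval c) - (10 * pvVal (cs.map pvDval) + pvDval c)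
                = 10 * (st.1 - pvVal (cs.map pvDval)) := by ring
            rw [this]; exact Dvd.dvd.mul_left ih1 10
          have h3 := dvd_add hx h2
          rwa [show (10 * pvVal (cs.map pvDval) + pvDval c) +
              ((10 * st.1 + pvDval c) - (10 * pvVal (cs.map pvDval) + pvDval c))
              = 10 * st.1 + pvDval c from by ring] at h3
      by_cases hx : PySem.Int.mod (10 * st.1 + pvDval c) m = 0
      · have hp := hiff.mp hx
        simp only [List.map_append, List.map_cons, List.map_nil] at hp
        simp [hx, hp]
      · have hnp : ¬ m ∣ pvVal (List.map pvDval cs ++ [pvDval c]) := by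
          intro hp
          exact hx (hiff.mpr (by simpa using hp))
        simp [hx, hnp]
    constructor
    · rw [hfold, hFst]
      exact hres
    · have hmap : List.map pvDval (cs ++ [c]) = List.map pvDval cs ++ [pvDval c] := by simp
      rw [hfold, hFst, hcond, hmap, pvSpecList_append m (cs.map pvDval) (pvDval c), ← ih2]
      simp

-- weighted sum of digits equals the Horner value of the prefix
theorem wsum_eq_pvVal (ds : List Int) :
    ∀ i, i < ds.length →
      ((List.range (i + 1)).map (fun j => ds.getD j 0 * 10 ^ (i - j))).sum
        = pvVal (ds.take (i + 1)) := by
  intro i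
  induction i with
  | zero =>
    intro h
    cases ds with
    | nil => simp at h
    | cons d t => simp [pvVal]
  | succ i ih =>
    intro h
    have hi : i < ds.length := by omega
    have hstep : ((List.range (i + 1)).map (fun j => ds.getD j 0 * 10 ^ (i + 1 - j))).sum
        = 10 * ((List.range (i + 1)).map (fun j => ds.getD j 0 * 10 ^ (i - j))).sum := by
      rw [← List.sum_map_mul_left]
      exact congrArg List.sum (List.map_congr_left (fun j hj => by
        have hji : j ≤ i := by have := List.mem_range.mp hj; omega
        have : i + 1 - j = (i - j) + 1 := by omega
        rw [this, pow_succ]; ring))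
    rw [List.range_succ, List.map_append, List.sum_append]
    simp only [List.map_cons, List.map_nil, List.sum_cons, List.sum_nil]
    rw [hstep, ih hi]
    have htake : ds.take (i + 1 + 1) = ds.take (i + 1) ++ [ds[i + 1]] := by
      rw [List.take_succ]
      congr 1
      rw [List.getElem?_eq_getElem h]
      rfl
    rw [htake, pvVal_append, List.getD_eq_getElem ds 0 h]
    ring_nf
    simp

-- B reduces to the same specification list
theorem alt_eq_spec (word : String) (m : Int)
    (h : ∀ c ∈ word.toList, PySem.Chars.isdigit c = true) :
    divisibilityArray_alt word m = pvSpecList m (word.toList.map pvDval) := by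
  have hdigs : word.toList.map (fun c => (PySem.Int.ofStr? (String.ofList [c])).getD 0)
      = word.toList.map pvDval :=
    List.map_congr_left (fun c hc => digit_val c (h c hc))
  simp only [divisibilityArray_alt]
  rw [hdigs]
  set ds := word.toList.map pvDval with hds
  have hlen : PySem.List.len ds = ((ds.length : Nat) : Int) := by
    simp [PySem.List.len_eq]
  rw [hlen, PySem.List.pyRange_zero_nat, List.map_map]
  unfold pvSpecList
  apply List.map_congr_left
  intro i hi
  have hiL : i < ds.length := List.mem_range.mp hi
  -- the inner range over j
  have hcast : ((i : Int) + 1) = (((i + 1 : Nat)) : Int) := by push_cast; ring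
  simp only [Function.comp_apply]
  rw [hcast, PySem.List.pyRange_zero_nat, List.map_map]
  -- rewrite each term of the inner sum
  have hterm : ∀ j ∈ List.range (i + 1),
      ((fun j => PySem.List.pyGetD ds j 0 *
          PySem.List.pyGetD
            (((List.range ds.length).map (fun k : Nat => (k : Int))).map
              (fun k => PySem.Int.mod (10 ^ k.toNat) m)) (i - j) 0) ∘ (fun k : Nat => (k : Int))) j
        = ds.getD j 0 * PySem.Int.mod (10 ^ (i - j)) m := by
    intro j hj
    have hji : j ≤ i := by have := List.mem_range.mp hj; omega
    simp only [Function.comp_apply]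
    have hsub : (i : Int) - (j : Int) = (((i - j : Nat)) : Int) := by push_cast [hji]; ring
    rw [hsub, ← PySem.List.pyRange_zero_nat,
      PySem.List.pyGetD_map_pyRange _ ds.length (i - j) 0 (by omega)]
    simp
  rw [List.map_congr_left hterm]
  -- divisibility transfer: the mod-weighted sum has the same residue as the exact sum
  have hdvd : m ∣ (((List.range (i + 1)).map (fun j => ds.getD j 0 * PySem.Int.mod (10 ^ (i - j)) m)).sum
      - ((List.range (i + 1)).map (fun j => ds.getD j 0 * 10 ^ (i - j))).sum) := by
    rw [sum_map_sub]
    apply List.dvd_sum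
    intro x hx
    obtain ⟨j, hj, rfl⟩ := List.mem_map.mp hx
    have : ds.getD j 0 * PySem.Int.mod (10 ^ (i - j)) m - ds.getD j 0 * 10 ^ (i - j)
        = ds.getD j 0 * (PySem.Int.mod (10 ^ (i - j)) m - 10 ^ (i - j)) := by ring
    rw [this]
    exact Dvd.dvd.mul_left (mod_sub_dvd _ _) _
  have hiff : (PySem.Int.mod
      (((List.range (i + 1)).map (fun j => ds.getD j 0 * PySem.Int.mod (10 ^ (i - j)) m)).sum) m = 0)
      ↔ m ∣ pvVal (ds.take (i + 1)) := by
    rw [PySem.Int.mod_eq_zero_iff_dvd, ← wsum_eq_pvVal ds i hiL]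
    constructor
    · intro hx
      have := dvd_sub hx hdvd
      simpa using this
    · intro hx
      have := dvd_add hx hdvd
      simpa using this
  simp only [List.getD_eq_getElem?_getD] at hiff
  simp [hiff]

-- ===== VERDICT (by name: the statement is the Claim_ definition above) =====
theorem divisibilityArray_spec : Claim_equal_divisibilityArray := by
  intro word m _hdom hpre
  obtain ⟨hm, hdig⟩ := hpre
  have hall : ∀ c ∈ word.toList, PySem.Chars.isdigit c = true := by
    intro c hc; exact List.all_eq_true.mp hdig c hc
  unfold Spec_divisibilityArray
  rw [alt_eq_spec word m hall]
  unfold divisibilityArray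
  exact (foldA_char m word.toList hall).2
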